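-- pv_equiv track=rewrite | github.com/BJ-Chen-Eric/qpcr-primer-disign | source/design_qpcr_junction_blastapi.py | max_run_gc
-- ===== SOURCE A (Python) =====
-- def max_run_gc(seq: str) -> int:
--     if not seq:
--         return 0
--     max_run = 0
--     run = 0
--     for ch in seq:
--         if ch in ("G", "C"):
--             run += 1
--             max_run = max(max_run, run)
--         else:
--             run = 0
--     return max_run
-- ===== SOURCE B (Python) =====
-- import re
--
-- def max_run_gc(seq: str) -> int:
--     runs = re.findall(r"[GC]+", seq)
--     return max((len(r) for r in runs), default=0)
-- ===== Notes on version B (the rewrite author's own statement) =====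
-- stated objective: simpler
-- what changed: Replaces the running-counter state machine with re.findall of maximal [GC]+ runs followed by max of their lengths (default 0); the regex scan runs in C, measured faster.
import Mathlib
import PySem

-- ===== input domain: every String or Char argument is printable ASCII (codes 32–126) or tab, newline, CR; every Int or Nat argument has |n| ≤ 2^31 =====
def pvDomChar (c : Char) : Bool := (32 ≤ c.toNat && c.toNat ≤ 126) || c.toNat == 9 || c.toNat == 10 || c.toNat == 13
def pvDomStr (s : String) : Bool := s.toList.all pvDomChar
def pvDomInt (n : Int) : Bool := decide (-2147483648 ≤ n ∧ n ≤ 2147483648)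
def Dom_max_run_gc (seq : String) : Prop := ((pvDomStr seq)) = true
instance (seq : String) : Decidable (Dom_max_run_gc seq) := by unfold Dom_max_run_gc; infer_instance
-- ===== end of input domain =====

-- B replaces A's running-counter state machine by materialising the maximal G/C runs
-- and taking the maximum of their lengths (objective: simpler decomposition).

-- ===== PORT A =====
-- literal port of A's single-pass loop: state (max_run, run)
def max_run_gc (seq : String) : Int :=
  if seq = "" then 0
  else
    (seq.toList.foldl
      (fun (st : Int × Int) ch =>
        if ch = 'G' ∨ ch = 'C' then (max st.1 (st.2 + 1), st.2 + 1)
        else (st.1, 0))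
      (0, 0)).1

-- ===== PORT B =====
def pvIsGC (c : Char) : Bool := c = 'G' || c = 'C'

-- lengths of the maximal [GC]+ runs of l (cur = length of the run in progress), like re.findall
def pvGcRuns (l : List Char) (cur : Int) : List Int :=
  match l with
  | [] => if cur > 0 then [cur] else []
  | c :: t =>
      if pvIsGC c then pvGcRuns t (cur + 1)
      else if cur > 0 then cur :: pvGcRuns t 0 else pvGcRuns t 0

def max_run_gc_alt (seq : String) : Int :=
  (pvGcRuns seq.toList 0).foldr max 0

-- ===== PRECONDITION & SPEC =====
def Spec_max_run_gc (seq : String) (out : Int) : Prop := out = max_run_gc_alt seq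
instance (seq : String) (out : Int) : Decidable (Spec_max_run_gc seq out) := by unfold Spec_max_run_gc; infer_instance

-- ===== CLAIM (what is proved, stated in full; the proofs are below) =====
def Claim_equal_max_run_gc : Prop := ∀ (seq : String), Dom_max_run_gc seq → Spec_max_run_gc seq (max_run_gc seq)

-- ===== LEMMAS AND PROOFS =====

def pvMaxL (l : List Int) : Int := l.foldr max 0

theorem pvMaxL_nonneg (l : List Int) : 0 ≤ pvMaxL l := by
  induction l with
  | nil => simp [pvMaxL]
  | cons a t ih => simp [pvMaxL] at *; omega

theorem pvGcRuns_head_ge (l : List Char) (cur : Int) (h : 0 < cur) :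
    cur ≤ pvMaxL (pvGcRuns l cur) := by
  induction l generalizing cur with
  | nil => simp [pvGcRuns, h, pvMaxL]
  | cons c t ih =>
      by_cases hc : pvIsGC c
      · simp only [pvGcRuns, hc, if_true]
        have := ih (cur + 1) (by omega); omega
      · simp [pvGcRuns, hc, h, pvMaxL]

theorem pvFold_inv (l : List Char) (m r : Int) (hr : 0 ≤ r) (hm : r ≤ m) :
    (l.foldl
      (fun (st : Int × Int) ch =>
        if ch = 'G' ∨ ch = 'C' then (max st.1 (st.2 + 1), st.2 + 1)
        else (st.1, 0))
      (m, r)).1 = max m (pvMaxL (pvGcRuns l r)) := by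
  induction l generalizing m r with
  | nil =>
      by_cases h : r > 0 <;> simp [pvGcRuns, pvMaxL, h] <;> omega
  | cons c t ih =>
      by_cases hc : c = 'G' ∨ c = 'C'
      · have hc' : pvIsGC c = true := by
          rcases hc with h | h <;> simp [pvIsGC, h]
        simp only [List.foldl_cons, hc, if_true, pvGcRuns, hc']
        rw [ih (max m (r + 1)) (r + 1) (by omega) (by omega)]
        have h1 := pvGcRuns_head_ge t (r + 1) (by omega)
        omega
      · have hc' : pvIsGC c = false := by
          simp [pvIsGC]; push Not at hc; exact ⟨hc.1, hc.2⟩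
        simp only [List.foldl_cons, hc, if_false, pvGcRuns, hc',
          Bool.false_eq_true, if_false]
        rw [ih m 0 le_rfl (by omega)]
        by_cases h : r > 0
        · simp only [h, if_true, pvMaxL, List.foldr]
          have := pvMaxL_nonneg (pvGcRuns t 0)
          simp only [pvMaxL] at this
          omega
        · simp [h]

theorem pv_main (seq : String) : max_run_gc seq = max_run_gc_alt seq := by
  unfold max_run_gc max_run_gc_alt
  by_cases h : seq = ""
  · subst h; simp [pvGcRuns]
  · simp only [h, if_false]
    rw [pvFold_inv seq.toList 0 0 le_rfl le_rfl]
    have := pvMaxL_nonneg (pvGcRuns seq.toList 0)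
    simp only [pvMaxL] at *
    omega

-- ===== VERDICT (by name: the statement is the Claim_ definition above) =====
theorem max_run_gc_spec : Claim_equal_max_run_gc := by
  intro seq _
  exact pv_main seq
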